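-- pv_equiv track=rewrite | github.com/LuciusLan/NegationProject | util.py | handle_eval_joint
-- ===== SOURCE A (Python) =====
-- def handle_eval_joint(pred, tar):
--     tar_cue_pos = []
--     pred_cue_pos = []
--     for i, e in enumerate(tar):
--         if e == 3:
--             tar_cue_pos.append(i)
--     for i, e in enumerate(pred):
--         if e == 3:
--             pred_cue_pos.append(i)
--     tar_cue_pos = set(tar_cue_pos)
--     pred_cue_pos = set(pred_cue_pos)
--     match = tar_cue_pos.intersection(pred_cue_pos)
--     if len(match) == 0 and (len(tar_cue_pos) != 0 or len(pred_cue_pos) != 0):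
--         if len(pred_cue_pos) > 0 and len(tar_cue_pos) == 0:
--             # if predicting a cue but no negation in ground truth, mark all predicted
--             # scope as false positive (set all tar negative)
--             # (Actually no need to do this, as the target scope will already be all 2)
--             pass
--         elif len(pred_cue_pos) == 0 and len(tar_cue_pos) > 0:
--             # if failed to predict a cue / predicting wrong cue
--             # mark all predicted scope as false negative
--             pred = [2 for e in tar]
--         else:
--             pred = [2 for e in tar]
--     return pred
-- ===== SOURCE B (Python) =====
-- def handle_eval_joint(pred, tar):
--     # B: two boolean existence scans instead of building position sets.
--     has_match = any(t == 3 and p == 3 for t, p in zip(tar, pred))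
--     has_tar_cue = any(t == 3 for t in tar)
--     if not has_match and has_tar_cue:
--         return [2 for _ in tar]
--     return pred
-- ===== Notes on version B (the rewrite author's own statement) =====
-- stated objective: simpler
-- what changed: Replaces the two index-list builds, set conversions and intersection plus the nested if/elif/else with two boolean any-scans (matched cue position over zip, tar cue over tar) and a single guard.
import Mathlib
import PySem

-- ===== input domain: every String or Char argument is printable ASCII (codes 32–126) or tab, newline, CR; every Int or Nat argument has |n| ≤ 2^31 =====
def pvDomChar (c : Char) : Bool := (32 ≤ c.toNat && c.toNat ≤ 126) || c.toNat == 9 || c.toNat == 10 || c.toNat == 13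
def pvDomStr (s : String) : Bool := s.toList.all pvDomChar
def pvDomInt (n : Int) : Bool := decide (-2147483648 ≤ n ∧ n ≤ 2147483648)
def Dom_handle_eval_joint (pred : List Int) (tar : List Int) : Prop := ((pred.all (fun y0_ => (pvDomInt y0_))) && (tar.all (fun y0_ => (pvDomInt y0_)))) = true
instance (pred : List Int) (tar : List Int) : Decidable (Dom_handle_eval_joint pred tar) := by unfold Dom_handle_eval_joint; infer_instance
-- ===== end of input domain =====

-- B replaces A's position-set construction and intersection by two boolean any-scans; objective: simpler.

-- ===== PORT A =====
def handle_eval_joint (pred : List Int) (tar : List Int) : List Int :=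
  let tar_cue_pos : List Int :=
    (PySem.List.enumerate tar 0).foldl (fun acc p => if p.2 == 3 then acc ++ [p.1] else acc) []
  let pred_cue_pos : List Int :=
    (PySem.List.enumerate pred 0).foldl (fun acc p => if p.2 == 3 then acc ++ [p.1] else acc) []
  let tarS : PySem.Set Int := PySem.Set.ofList tar_cue_pos
  let predS : PySem.Set Int := PySem.Set.ofList pred_cue_pos
  let m : PySem.Set Int := PySem.Set.inter tarS predS
  if PySem.Set.len m = 0 ∧ (PySem.Set.len tarS ≠ 0 ∨ PySem.Set.len predS ≠ 0) then
    if PySem.Set.len predS > 0 ∧ PySem.Set.len tarS = 0 then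
      pred            -- 'pass': pred unchanged
    else if PySem.Set.len predS = 0 ∧ PySem.Set.len tarS > 0 then
      tar.map (fun _ => (2 : Int))
    else
      tar.map (fun _ => (2 : Int))
  else pred

-- ===== PORT B =====
def handle_eval_joint_alt (pred : List Int) (tar : List Int) : List Int :=
  let has_match := (tar.zip pred).any (fun p => p.1 == 3 && p.2 == 3)
  let has_tar_cue := tar.any (fun t => t == 3)
  if !has_match && has_tar_cue then tar.map (fun _ => (2 : Int)) else pred

-- ===== PRECONDITION & SPEC =====
def Spec_handle_eval_joint (pred : List Int) (tar : List Int) (out : List Int) : Prop := out = handle_eval_joint_alt pred tar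
instance (pred : List Int) (tar : List Int) (out : List Int) : Decidable (Spec_handle_eval_joint pred tar out) := by unfold Spec_handle_eval_joint; infer_instance

-- ===== CLAIM (what is proved, stated in full; the proofs are below) =====
def Claim_equal_handle_eval_joint : Prop := ∀ (pred : List Int) (tar : List Int), Dom_handle_eval_joint pred tar → Spec_handle_eval_joint pred tar (handle_eval_joint pred tar)

-- ===== LEMMAS AND PROOFS =====

-- the deduplicated cue-position set A builds for a list
def pvCue (xs : List Int) : PySem.Set Int :=
  PySem.Set.ofList (((PySem.List.enumerate xs 0).filter (fun p => p.2 == 3)).map (fun p => p.1))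

theorem mem_pvCue (xs : List Int) (i : Int) :
    i ∈ pvCue xs ↔ ∃ (k : Nat), ∃ _ : k < xs.length, xs[k] = 3 ∧ i = (k : Int) := by
  simp only [pvCue, PySem.Set.mem_ofList, List.mem_map, List.mem_filter,
    PySem.List.mem_enumerate_iff]
  constructor
  · rintro ⟨p, ⟨⟨k, hk, rfl⟩, hp3⟩, rfl⟩
    exact ⟨k, hk, by simpa using hp3, by simp⟩
  · rintro ⟨k, hk, h3, rfl⟩
    exact ⟨((k : Int), xs[k]), ⟨⟨k, hk, by simp⟩, by simpa using h3⟩, rfl⟩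

theorem pvCue_nil_iff (xs : List Int) :
    pvCue xs = [] ↔ xs.any (fun t => t == 3) = false := by
  rw [List.eq_nil_iff_forall_not_mem]
  constructor
  · intro h
    by_contra hc
    rw [Bool.not_eq_false, List.any_eq_true] at hc
    obtain ⟨x, hx, hx3⟩ := hc
    obtain ⟨k, hk, hget⟩ := List.mem_iff_getElem.mp hx
    exact h (k : Int) ((mem_pvCue xs k).mpr ⟨k, hk, by simp_all, rfl⟩)
  · intro h i hi
    obtain ⟨k, hk, h3, rfl⟩ := (mem_pvCue xs i).mp hi
    have := List.any_eq_false.mp h xs[k] (xs.getElem_mem hk)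
    simp [h3] at this

theorem pvInter_nil_iff (pred tar : List Int) :
    PySem.Set.inter (pvCue tar) (pvCue pred) = [] ↔
      (tar.zip pred).any (fun p => p.1 == 3 && p.2 == 3) = false := by
  rw [PySem.Set.inter, List.filter_eq_nil_iff]
  constructor
  · intro h
    rw [List.any_eq_false]
    rintro ⟨t, p⟩ hmem
    obtain ⟨k, hk, hget⟩ := List.mem_iff_getElem.mp hmem
    rw [List.length_zip] at hk
    have hk1 : k < tar.length := lt_of_lt_of_le hk (min_le_left _ _)
    have hk2 : k < pred.length := lt_of_lt_of_le hk (min_le_right _ _)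
    have ht : tar[k] = t := by
      have := congrArg Prod.fst hget; simpa [List.getElem_zip] using this
    have hp : pred[k] = p := by
      have := congrArg Prod.snd hget; simpa [List.getElem_zip] using this
    simp only [Bool.and_eq_true, beq_iff_eq, not_and]
    intro h3 hp3
    have hmemT : (k : Int) ∈ pvCue tar := (mem_pvCue tar k).mpr ⟨k, hk1, by simp_all, rfl⟩
    have hmemP : (k : Int) ∈ pvCue pred := (mem_pvCue pred k).mpr ⟨k, hk2, by simp_all, rfl⟩
    have := h _ hmemT
    rw [PySem.Set.contains_iff] at this
    · exact absurd hmemP (by simpa using this)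
  · intro h i hi
    obtain ⟨k, hk, h3, rfl⟩ := (mem_pvCue tar i).mp hi
    simp only [Bool.not_eq_true]
    rw [Bool.eq_false_iff]
    intro hcon
    rw [PySem.Set.contains_iff] at hcon
    obtain ⟨j, hj, hp3, hjk⟩ := (mem_pvCue pred (k : Int)).mp hcon
    have hjk' : k = j := by exact_mod_cast hjk
    subst hjk'
    have hz : (tar[k], pred[k]) ∈ tar.zip pred := by
      refine List.mem_iff_getElem.mpr ⟨k, ?_, ?_⟩
      · rw [List.length_zip]; omega
      · rw [List.getElem_zip]
    have := List.any_eq_false.mp h _ hz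
    simp [h3, hp3] at this

theorem pvLen_eq_zero (s : PySem.Set Int) : PySem.Set.len s = 0 ↔ s = [] := by
  simp [PySem.Set.len, List.length_eq_zero_iff]

-- ===== VERDICT (by name: the statement is the Claim_ definition above) =====
theorem handle_eval_joint_spec : Claim_equal_handle_eval_joint := by
  intro pred tar _
  unfold Spec_handle_eval_joint handle_eval_joint handle_eval_joint_alt
  simp only [PySem.List.foldl_append_if, List.nil_append]
  have hT := pvCue_nil_iff tar
  have hM := pvInter_nil_iff pred tar
  simp only [pvCue] at hT hM
  rcases hm : (tar.zip pred).any (fun p => p.1 == 3 && p.2 == 3) with _ | _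
  · -- no matched cue position
    rcases ht : tar.any (fun t => t == 3) with _ | _
    · -- no tar cue either: A returns pred in both reachable branches
      have hTnil := hT.mpr ht
      simp only [hTnil, pvLen_eq_zero]
      by_cases hp : PySem.Set.len (PySem.Set.ofList
          (((PySem.List.enumerate pred 0).filter (fun p => p.2 == 3)).map (fun p => p.1))) = 0 <;>
        simp_all [PySem.Set.len]
    · -- tar cue present, no match: both replace by all-2
      have hTne : ¬ (PySem.Set.ofList
          (((PySem.List.enumerate tar 0).filter (fun p => p.2 == 3)).map (fun p => p.1))) = [] := by
        intro h; rw [hT] at h; simp [h] at ht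
      simp only [pvLen_eq_zero, hM.mpr hm]
      simp_all [PySem.Set.len, List.length_eq_zero_iff]
  · -- matched cue: intersection nonempty, A's outer guard false
    have hMne : ¬ PySem.Set.inter
        (PySem.Set.ofList (((PySem.List.enumerate tar 0).filter (fun p => p.2 == 3)).map (fun p => p.1)))
        (PySem.Set.ofList (((PySem.List.enumerate pred 0).filter (fun p => p.2 == 3)).map (fun p => p.1))) = [] := by
      intro h; rw [hM] at h; simp_all
    simp_all [PySem.Set.len, List.length_eq_zero_iff]
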